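-- pv_equiv track=rewrite | github.com/MSeelbach/Q-Match | Qaplib/ShapeMatching.py | IntToVector
-- ===== SOURCE A (Python) =====
-- def IntToVector(n, digits):
--     #binary representation of the number n, saved as list.
--
--     num=n
--     binary = []
--     for k in range(digits):
--         if num!=0:
--             bit = num % 2
--             binary.insert(0, bit)
--             num = num // 2
--         else:
--             binary.insert(0,0)
--
--     return binary
-- ===== SOURCE B (Python) =====
-- def IntToVector(n, digits):
--     # Each output position extracted directly: bit (digits-1-i) of n,
--     # via arithmetic shift (two's complement matches Python's floor //).
--     return [(n >> (digits - 1 - i)) % 2 for i in range(digits)]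
-- ===== Notes on version B (the rewrite author's own statement) =====
-- stated objective: simpler
-- what changed: B computes each output bit independently by shifting n right by its positional distance from the MSB, as a single comprehension: no running quotient, no accumulator, no insert(0,.) prepend (which makes A quadratic), no zero-padding branch.
import Mathlib
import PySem

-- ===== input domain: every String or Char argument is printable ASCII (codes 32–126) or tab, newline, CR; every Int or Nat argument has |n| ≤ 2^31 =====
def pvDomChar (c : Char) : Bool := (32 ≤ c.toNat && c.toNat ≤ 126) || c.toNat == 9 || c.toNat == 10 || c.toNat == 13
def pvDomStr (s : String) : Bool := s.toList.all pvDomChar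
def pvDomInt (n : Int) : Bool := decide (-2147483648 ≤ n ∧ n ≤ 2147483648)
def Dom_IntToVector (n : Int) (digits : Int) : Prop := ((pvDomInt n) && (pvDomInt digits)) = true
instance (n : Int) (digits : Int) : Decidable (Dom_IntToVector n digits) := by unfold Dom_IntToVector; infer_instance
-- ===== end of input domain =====

-- B replaces A's running-quotient loop with a per-position shift: one line, no state. (objective: simpler)

-- ===== PORT A =====
-- literal port: loop over range(digits), state (num, binary); binary.insert(0, ·) prepends
def IntToVector (n : Int) (digits : Int) : List Int :=
  (((PySem.List.pyRange 0 digits 1).foldl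
    (fun (st : Int × List Int) _k =>
      if st.1 ≠ 0 then
        (PySem.Int.floordiv st.1 2, PySem.List.insert st.2 0 (PySem.Int.mod st.1 2))
      else
        (st.1, PySem.List.insert st.2 0 0))
    (n, []))).2

-- ===== PORT B =====
-- (n >> s) with s = digits-1-i, always ≥ 0 on the range: Int.shiftRight by s.toNat is Python's
-- arithmetic right shift exactly (two's complement); `% 2` is PySem.Int.mod.
def IntToVector_alt (n : Int) (digits : Int) : List Int :=
  (PySem.List.pyRange 0 digits 1).map
    (fun i => PySem.Int.mod (n >>> (digits - 1 - i).toNat) 2)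

-- ===== PRECONDITION & SPEC =====
def Spec_IntToVector (n : Int) (digits : Int) (out : List Int) : Prop := out = IntToVector_alt n digits
instance (n : Int) (digits : Int) (out : List Int) : Decidable (Spec_IntToVector n digits out) := by unfold Spec_IntToVector; infer_instance

-- ===== CLAIM (what is proved, stated in full; the proofs are below) =====
def Claim_equal_IntToVector : Prop := ∀ (n : Int) (digits : Int), Dom_IntToVector n digits → Spec_IntToVector n digits (IntToVector n digits)

-- ===== LEMMAS AND PROOFS =====

theorem pv_fdiv_two (a : Int) : Int.fdiv a 2 = a / 2 := by
  rw [Int.fdiv_eq_ediv]; norm_num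

theorem pv_fmod_two (a : Int) : Int.fmod a 2 = a % 2 := by
  rw [Int.fmod_eq_emod]; norm_num

-- A's branch collapses: on num = 0 the else branch equals the then branch's values.
theorem pv_stepA (m : Int) (acc : List Int) :
    (if m ≠ 0 then
        (PySem.Int.floordiv m 2, PySem.List.insert acc 0 (PySem.Int.mod m 2))
      else
        (m, PySem.List.insert acc 0 0))
    = (m / 2, (m % 2) :: acc) := by
  by_cases h : m = 0
  · subst h; simp [PySem.List.insert_zero]
  · simp [h, PySem.List.insert_zero, PySem.Int.floordiv, PySem.Int.mod,
      pv_fdiv_two, pv_fmod_two]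

-- closed form of A's loop over any list (the element is ignored)
theorem pv_loopA {α : Type} (l : List α) (m : Int) (acc : List Int) :
    l.foldl
      (fun (st : Int × List Int) _k =>
        if st.1 ≠ 0 then
          (PySem.Int.floordiv st.1 2, PySem.List.insert st.2 0 (PySem.Int.mod st.1 2))
        else
          (st.1, PySem.List.insert st.2 0 0))
      (m, acc)
    = (m / 2 ^ l.length,
       ((List.range l.length).map (fun j => (m / 2 ^ j) % 2)).reverse ++ acc) := by
  induction l generalizing m acc with
  | nil => simp
  | cons a t ih =>
      rw [List.foldl_cons, pv_stepA, ih]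
      have hdiv : ∀ j : ℕ, m / 2 / 2 ^ j = m / 2 ^ (j + 1) := by
        intro j
        rw [Int.ediv_ediv_of_nonneg (by norm_num)]
        ring_nf
      simp only [List.length_cons, List.range_succ_eq_map, List.map_cons,
        List.map_map, List.reverse_cons, Function.comp_def, hdiv]
      simp

theorem pv_shift_eq (a : Int) (k : Nat) : a >>> k = a / 2 ^ k := by
  rw [Int.shiftRight_eq_div_pow]; push_cast; ring_nf

-- ===== VERDICT (by name: the statement is the Claim_ definition above) =====
theorem IntToVector_spec : Claim_equal_IntToVector := by
  unfold Claim_equal_IntToVector Spec_IntToVector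
  intro n digits _
  unfold IntToVector IntToVector_alt
  rw [pv_loopA, PySem.List.pyRange_one]
  simp only [List.length_map, List.length_range, List.append_nil, List.map_map]
  set L : Nat := (digits - 0).toNat with hL
  apply List.ext_getElem
  · simp
  · intro i h1 h2
    simp only [List.length_reverse, List.length_map, List.length_range] at h1
    rw [List.getElem_reverse]
    simp only [List.getElem_map, List.getElem_range, Function.comp_def]
    have hi : i < L := h1
    have hd : (digits - 1 - ((0 : Int) + (i : Int))).toNat = L - 1 - i := by
      have hdig : digits = (L : Int) := by omega
      omega
    rw [hd, pv_shift_eq]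
    simp [PySem.Int.mod, pv_fmod_two]
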